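-- pv_equiv track=rewrite | github.com/pypi-data/pypi-mirror-96 | packages/intercom-test/intercom_test-2.2.0.tar.gz/intercom_test-2.2.0/lib/intercom_test/http_stub_server.py | _headers_with_default_content_type
-- ===== SOURCE A (Python) =====
-- from typing import Iterable, List, Optional, Tuple
--
-- NameValuePair = Tuple[str, str]
--
-- def _headers_with_default_content_type(headers: Iterable[Tuple[str, str]], default_content_type: str) -> Iterable[NameValuePair]:
--     content_type_given = False
--     for item in headers:
--         if item[0].lower() == 'content-type':
--             content_type_given = True
--         yield item
--
--     if not content_type_given:
--         yield ('Content-Type', default_content_type)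
-- ===== SOURCE B (Python) =====
-- def _headers_with_default_content_type(headers, default_content_type):
--     def go(items):
--         # recursion on the list; stops inspecting names as soon as a
--         # Content-Type header is found and returns the tail unchanged
--         if not items:
--             return [('Content-Type', default_content_type)]
--         head = items[0]
--         if head[0].lower() == 'content-type':
--             return items
--         return [head] + go(items[1:])
--     yield from go(list(headers))
-- ===== Notes on version B (the rewrite author's own statement) =====
-- stated objective: alternative
-- what changed: Replaces A's interleaved yield-and-set-flag loop over the whole input with a recursive decomposition that short-circuits: once a Content-Type header is found the remaining items are returned unchanged without further name inspection, and the default pair is produced only by the base case of the recursion reaching the end.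
import Mathlib
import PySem

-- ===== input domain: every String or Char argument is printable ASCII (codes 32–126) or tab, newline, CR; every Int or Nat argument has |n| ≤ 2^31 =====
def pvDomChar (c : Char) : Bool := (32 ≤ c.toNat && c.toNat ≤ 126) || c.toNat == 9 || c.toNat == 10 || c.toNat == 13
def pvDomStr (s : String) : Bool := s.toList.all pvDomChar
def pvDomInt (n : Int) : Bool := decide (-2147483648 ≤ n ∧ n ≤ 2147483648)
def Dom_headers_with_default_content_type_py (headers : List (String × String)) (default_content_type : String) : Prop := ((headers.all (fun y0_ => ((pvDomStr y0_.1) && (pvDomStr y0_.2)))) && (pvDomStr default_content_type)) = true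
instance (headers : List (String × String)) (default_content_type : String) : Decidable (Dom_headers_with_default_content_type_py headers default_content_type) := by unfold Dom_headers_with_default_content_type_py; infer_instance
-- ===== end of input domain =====

-- B replaces A's full-scan yield-and-set-flag loop with a short-circuiting recursion
-- (once Content-Type is found the tail is returned unchanged): alternative decomposition, same output.

-- ===== PORT A =====
-- A: one interleaved loop yielding each item while setting a flag when a Content-Type header is seen.
def headers_with_default_content_type_py (headers : List (String × String)) (default_content_type : String) : List (String × String) :=
  let st := headers.foldl
    (fun (st : List (String × String) × Bool) item =>
      if PySem.Str.lower item.1 == "content-type" then (st.1 ++ [item], true)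
      else (st.1 ++ [item], st.2))
    ([], false)
  if !st.2 then st.1 ++ [("Content-Type", default_content_type)] else st.1

-- ===== PORT B =====
-- B's helper `go`: recursion on the list, stopping at the first Content-Type header.
def pvAltGo (default_content_type : String) : List (String × String) → List (String × String)
  | [] => [("Content-Type", default_content_type)]
  | head :: tail =>
      if PySem.Str.lower head.1 == "content-type" then head :: tail
      else [head] ++ pvAltGo default_content_type tail

def headers_with_default_content_type_py_alt (headers : List (String × String)) (default_content_type : String) : List (String × String) :=
  pvAltGo default_content_type headers

-- ===== PRECONDITION & SPEC =====
def Spec_headers_with_default_content_type_py (headers : List (String × String)) (default_content_type : String) (out : List (String × String)) : Prop := out = headers_with_default_content_type_py_alt headers default_content_type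
instance (headers : List (String × String)) (default_content_type : String) (out : List (String × String)) : Decidable (Spec_headers_with_default_content_type_py headers default_content_type out) := by unfold Spec_headers_with_default_content_type_py; infer_instance

-- ===== CLAIM =====
def Claim_equal_headers_with_default_content_type_py : Prop := ∀ (headers : List (String × String)) (default_content_type : String), Dom_headers_with_default_content_type_py headers default_content_type → Spec_headers_with_default_content_type_py headers default_content_type (headers_with_default_content_type_py headers default_content_type)

-- ===== LEMMAS AND PROOFS =====

theorem aLoop_char (headers : List (String × String)) (acc : List (String × String)) (flag : Bool) :
    headers.foldl
      (fun (st : List (String × String) × Bool) item =>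
        if PySem.Str.lower item.1 == "content-type" then (st.1 ++ [item], true)
        else (st.1 ++ [item], st.2))
      (acc, flag)
    = (acc ++ headers, flag || headers.any (fun p => PySem.Str.lower p.1 == "content-type")) := by
  induction headers generalizing acc flag with
  | nil => simp
  | cons h t ih =>
    by_cases hc : (PySem.Str.lower h.1 == "content-type") = true
    · rw [List.foldl_cons, if_pos hc, ih]
      simp [hc]
    · rw [List.foldl_cons, if_neg hc, ih]
      simp only [List.any_cons]
      rw [Bool.eq_false_iff.mpr hc]
      simp

theorem pvAltGo_char (d : String) (headers : List (String × String)) :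
    pvAltGo d headers
    = headers ++ (if headers.any (fun p => PySem.Str.lower p.1 == "content-type") then [] else [("Content-Type", d)]) := by
  induction headers with
  | nil => simp [pvAltGo]
  | cons h t ih =>
    by_cases hc : (PySem.Str.lower h.1 == "content-type") = true
    · simp [pvAltGo, hc]
    · simp only [pvAltGo, hc, ih, List.any_cons, Bool.false_or, List.cons_append]
      simp

-- ===== VERDICT =====
theorem headers_with_default_content_type_py_spec : Claim_equal_headers_with_default_content_type_py := by
  intro headers d _
  unfold Spec_headers_with_default_content_type_py
  unfold headers_with_default_content_type_py headers_with_default_content_type_py_alt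
  rw [aLoop_char, pvAltGo_char]
  by_cases h : (headers.any fun p => PySem.Str.lower p.1 == "content-type") = true <;> simp [h]
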